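-- pv_equiv track=rewrite | github.com/kyungwon-dev/Algorithm_Solved | 프로그래머스/lv3/12987. 숫자 게임/숫자 게임.py | solution
-- ===== SOURCE A (Python) =====
-- import heapq
--
-- def solution(A, B):
--     answer = 0
--     A, B = [-i for i in A], [-i for i in B]
--
--     heapq.heapify(A)
--     heapq.heapify(B)
--
--     while A and B:
--         a = -heapq.heappop(A)
--         b = -heapq.heappop(B)
--         if b > a:
--             answer+=1
--         else:
--             heapq.heappush(B, -b)
--
--     return answer
-- ===== SOURCE B (Python) =====
-- def solution(A, B):
--     sa = sorted(A, reverse=True)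
--     sb = sorted(B, reverse=True)
--     count = 0
--     for a in sa:
--         if count < len(sb) and sb[count] > a:
--             count += 1
--     return count
-- ===== Notes on version B (the rewrite author's own statement) =====
-- stated objective: faster
-- what changed: Replaces the heap pop/push-back loop with one descending pre-sort of both lists and a single linear counting pass (the count itself is the pointer into sorted B).
import Mathlib
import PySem

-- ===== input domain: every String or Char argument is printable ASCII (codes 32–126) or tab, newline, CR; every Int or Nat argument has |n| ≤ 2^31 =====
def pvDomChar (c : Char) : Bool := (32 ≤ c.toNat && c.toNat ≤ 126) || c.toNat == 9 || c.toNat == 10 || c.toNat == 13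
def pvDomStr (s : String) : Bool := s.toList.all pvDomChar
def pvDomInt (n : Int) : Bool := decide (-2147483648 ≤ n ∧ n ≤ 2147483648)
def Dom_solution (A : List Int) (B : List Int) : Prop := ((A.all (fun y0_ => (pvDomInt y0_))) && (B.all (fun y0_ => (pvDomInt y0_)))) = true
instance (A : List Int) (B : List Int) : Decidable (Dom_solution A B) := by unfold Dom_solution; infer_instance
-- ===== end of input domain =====

-- B replaces A's heap pop/push-back loop by one descending pre-sort of both lists and a single
-- linear counting pass; objective: faster (no repeated heap operations).

-- ===== PORT A =====
-- heapq is ported by hand via its pop-min contract: heappop returns the smallest element and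
-- removes one occurrence of it; heappush adds the element. For Int elements this is exact:
-- only the sequence of popped VALUES (always the minimum of the current multiset) is observable
-- in A's result, and it is identical to CPython's binary-heap implementation.
def heapLoop (hA : List Int) (hB : List Int) (answer : Int) : Int :=
  match hmA : PySem.List.min? hA (fun x => x), hmB : PySem.List.min? hB (fun x => x) with
  | some na, some nb =>
      let a := -na
      let b := -nb
      if b > a then heapLoop (hA.erase na) (hB.erase nb) (answer + 1)
      else heapLoop (hA.erase na) (hB.erase nb ++ [-b]) answer
  | _, _ => answer
termination_by hA.length
decreasing_by
  · exact List.length_erase_of_mem (PySem.List.min?_mem hmA) ▸ Nat.sub_lt (List.length_pos_iff.mpr (by rintro rfl; simp [PySem.List.min?] at hmA)) (by norm_num)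
  · exact List.length_erase_of_mem (PySem.List.min?_mem hmA) ▸ Nat.sub_lt (List.length_pos_iff.mpr (by rintro rfl; simp [PySem.List.min?] at hmA)) (by norm_num)

def solution (A : List Int) (B : List Int) : Int :=
  heapLoop (A.map (fun i => -i)) (B.map (fun i => -i)) 0

-- ===== PORT B =====
def solution_alt (A : List Int) (B : List Int) : Int :=
  let sa := PySem.List.sorted A (fun x => x) true
  let sb := PySem.List.sorted B (fun x => x) true
  sa.foldl (fun count a =>
    if count < (sb.length : Int) ∧ PySem.List.pyGetD sb count 0 > a then count + 1 else count) 0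

-- ===== PRECONDITION & SPEC =====
def Spec_solution (A : List Int) (B : List Int) (out : Int) : Prop := out = solution_alt A B
instance (A : List Int) (B : List Int) (out : Int) : Decidable (Spec_solution A B out) := by unfold Spec_solution; infer_instance

-- ===== CLAIM (what is proved, stated in full; the proofs are below) =====
def Claim_equal_solution : Prop := ∀ (A : List Int) (B : List Int), Dom_solution A B → Spec_solution A B (solution A B)

-- ===== LEMMAS AND PROOFS =====

-- the greedy count on ASCENDING negated lists (A's loop, abstracted to sorted order)
def cnt : List Int → List Int → Int
  | [], _ => 0
  | _ :: _, [] => 0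
  | x :: xs, y :: ys => if -y > -x then 1 + cnt xs ys else cnt xs (y :: ys)

-- the same greedy count on DESCENDING original lists (B's scan)
def dcnt : List Int → List Int → Int
  | [], _ => 0
  | _ :: _, [] => 0
  | a :: as, b :: bs => if b > a then 1 + dcnt as bs else dcnt as (b :: bs)

-- popping the min from a list is taking the head of its sorted order
theorem sorted_pop (l : List Int) (m : Int) (h : PySem.List.min? l (fun x => x) = some m) :
    PySem.List.sorted l (fun x => x) false = m :: PySem.List.sorted (l.erase m) (fun x => x) false := by
  apply PySem.List.sorted_id_eq_of_perm_of_pairwise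
  · exact ((PySem.List.sorted_perm (l.erase m) (fun x => x) false).cons m).trans
      (List.perm_cons_erase (PySem.List.min?_mem h)).symm
  · refine List.Pairwise.cons ?_ (PySem.List.sorted_pairwise (l.erase m) (fun x => x))
    intro y hy
    exact PySem.List.min?_isMin h y (List.mem_of_mem_erase ((PySem.List.mem_sorted _ _ _ _).mp hy))

-- pushing the popped min back restores the sorted order
theorem sorted_pushback (l : List Int) (m : Int) (hm : m ∈ l) :
    PySem.List.sorted (l.erase m ++ [m]) (fun x => x) false = PySem.List.sorted l (fun x => x) false := by
  exact PySem.List.sorted_eq_sorted_of_perm _ _ _ (fun a b h => h)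
    ((List.perm_append_singleton m (l.erase m)).trans (List.perm_cons_erase hm).symm)

-- A's heap loop computes the greedy count over the sorted orders
theorem heapLoop_eq_cnt (n : Nat) (hA hB : List Int) (ans : Int) (hn : hA.length ≤ n) :
    heapLoop hA hB ans
      = ans + cnt (PySem.List.sorted hA (fun x => x) false) (PySem.List.sorted hB (fun x => x) false) := by
  induction n generalizing hA hB ans with
  | zero =>
      have : hA = [] := List.length_eq_zero_iff.mp (Nat.le_zero.mp hn)
      subst this
      rw [heapLoop]
      simp [PySem.List.min?, cnt, PySem.List.sorted]
  | succ n ih =>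
      rw [heapLoop]
      rcases hmA : PySem.List.min? hA (fun x => x) with _ | na
      · have : hA = [] := (PySem.List.min?_eq_none_iff _ _).mp hmA
        subst this; simp [cnt, PySem.List.sorted]
      · rcases hmB : PySem.List.min? hB (fun x => x) with _ | nb
        · have : hB = [] := (PySem.List.min?_eq_none_iff _ _).mp hmB
          subst this
          simp only
          rw [sorted_pop _ _ hmA]
          simp [cnt, PySem.List.sorted]
        · have hmemA := PySem.List.min?_mem hmA
          have hpos : 0 < hA.length := List.length_pos_of_mem hmemA
          have hlen : (hA.erase na).length ≤ n := by
            rw [List.length_erase_of_mem hmemA]; omega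
          simp only
          rw [sorted_pop _ _ hmA, sorted_pop _ _ hmB]
          by_cases hgt : -nb > -na
          · rw [if_pos hgt, ih _ _ _ hlen, cnt, if_pos hgt]
            ring
          · rw [if_neg hgt, neg_neg, ih _ _ _ hlen, cnt, if_neg hgt,
                sorted_pushback _ _ (PySem.List.min?_mem hmB), sorted_pop _ _ hmB]

-- negating both lists turns the ascending greedy count into the descending one
theorem dcnt_neg (xs ys : List Int) :
    dcnt (xs.map (fun i => -i)) (ys.map (fun i => -i)) = cnt xs ys := by
  induction xs generalizing ys with
  | nil => simp [dcnt, cnt]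
  | cons x xs ih =>
      cases ys with
      | nil => simp [dcnt, cnt]
      | cons y ys =>
          simp only [List.map_cons, dcnt, cnt]
          by_cases h : -y > -x
          · rw [if_pos h, if_pos h, ih]
          · rw [if_neg h, if_neg h, ← List.map_cons, ih]

-- sorted(A, reverse=True) is the elementwise negation of sorted(-A)
theorem sorted_rev_eq_neg_sorted (A : List Int) :
    PySem.List.sorted A (fun x => x) true
      = (PySem.List.sorted (A.map (fun i => -i)) (fun x => x) false).map (fun i => -i) := by
  apply List.Perm.eq_of_pairwise (le := fun a b : Int => b ≤ a)
      (fun a b _ _ h1 h2 => le_antisymm h2 h1)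
  · exact PySem.List.sorted_pairwise_rev A (fun x => x)
  · exact List.Pairwise.map _ (fun a b (h : a ≤ b) => by omega)
      (PySem.List.sorted_pairwise (A.map (fun i => -i)) (fun x => x))
  · refine (PySem.List.sorted_perm A (fun x => x) true).trans ?_
    have h : ((PySem.List.sorted (A.map (fun i => -i)) (fun x => x) false).map (fun i => -i)).Perm
        ((A.map (fun i => -i)).map (fun i => -i)) :=
      (PySem.List.sorted_perm (A.map (fun i => -i)) (fun x => x) false).map _
    simpa [List.map_map, Function.comp] using h.symm

-- B's counting fold, started at pointer j, is j plus the greedy count on the remaining suffix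
theorem foldl_eq_dcnt (sb : List Int) (sa : List Int) (j : Nat) (hj : j ≤ sb.length) :
    sa.foldl (fun count a =>
        if count < (sb.length : Int) ∧ PySem.List.pyGetD sb count 0 > a then count + 1 else count)
      (j : Int)
      = (j : Int) + dcnt sa (sb.drop j) := by
  induction sa generalizing j with
  | nil => cases sb.drop j with | nil => simp [dcnt] | cons b bs => simp [dcnt]
  | cons a sa ih =>
      rcases Nat.lt_or_ge j sb.length with hlt | hge
      · have hdrop : sb.drop j = sb[j] :: sb.drop (j + 1) := List.drop_eq_getElem_cons hlt
        have hget : PySem.List.pyGetD sb (j : Int) 0 = sb[j] := by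
          rw [PySem.List.pyGetD_natCast]; exact List.getD_eq_getElem sb 0 hlt
        simp only [List.foldl_cons, hdrop, dcnt]
        by_cases hb : sb[j] > a
        · rw [if_pos ⟨by exact_mod_cast hlt, by rw [hget]; exact hb⟩, if_pos hb]
          have : ((j : Int) + 1) = ((j + 1 : Nat) : Int) := by push_cast; ring
          rw [this, ih (j + 1) hlt]
          push_cast; ring
        · rw [if_neg (by rw [hget]; tauto), if_neg hb, ih j hj, hdrop]
      · have hj' : j = sb.length := le_antisymm hj hge
        have hdrop : sb.drop j = [] := by simp [hj']
        simp only [List.foldl_cons, hdrop, dcnt]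
        rw [if_neg (by rw [hj']; simp), ih j hj, hdrop]
        cases sa with | nil => simp [dcnt] | cons c cs => simp [dcnt]

-- ===== VERDICT (by name: the statement is the Claim_ definition above) =====
theorem solution_spec : Claim_equal_solution := by
  intro A B _
  unfold Spec_solution solution solution_alt
  rw [heapLoop_eq_cnt (A.map (fun i => -i)).length _ _ _ le_rfl,
      ← dcnt_neg, ← sorted_rev_eq_neg_sorted, ← sorted_rev_eq_neg_sorted]
  have := foldl_eq_dcnt (PySem.List.sorted B (fun x => x) true)
    (PySem.List.sorted A (fun x => x) true) 0 (Nat.zero_le _)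
  simpa using this.symm
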